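-- pv_equiv track=rewrite | github.com/diponsaha007/Rokomari | rokomariapp/views.py | slice_name
-- ===== SOURCE A (Python) =====
-- def slice_name(str):
--     ret = ""
--     for i in range(len(str)):
--         if len(ret) >= 23:
--             ret += "..."
--             break
--         if str[i] == ':' or str[i] == '(':
--             break
--         ret += str[i]
--
--     return ret
-- ===== SOURCE B (Python) =====
-- def slice_name(str):
--     # Index-then-slice: find the first delimiter position within the first 24
--     # chars, then slice, instead of growing the result char by char.
--     head = str[:24]
--     d = next((i for i, ch in enumerate(head) if ch in ':('), len(head))
--     if d >= 23 and len(str) >= 24: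
--         return str[:23] + "..."
--     return str[:d]
-- ===== Notes on version B (the rewrite author's own statement) =====
-- stated objective: alternative
-- what changed: Replaces A's char-by-char accumulation loop with two breaks by an index-then-slice decomposition: find the first ':'/'(' position d in the first 24 characters, then return str[:23]+'...' if d >= 23 and len(str) >= 24, else str[:d].
import Mathlib
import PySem

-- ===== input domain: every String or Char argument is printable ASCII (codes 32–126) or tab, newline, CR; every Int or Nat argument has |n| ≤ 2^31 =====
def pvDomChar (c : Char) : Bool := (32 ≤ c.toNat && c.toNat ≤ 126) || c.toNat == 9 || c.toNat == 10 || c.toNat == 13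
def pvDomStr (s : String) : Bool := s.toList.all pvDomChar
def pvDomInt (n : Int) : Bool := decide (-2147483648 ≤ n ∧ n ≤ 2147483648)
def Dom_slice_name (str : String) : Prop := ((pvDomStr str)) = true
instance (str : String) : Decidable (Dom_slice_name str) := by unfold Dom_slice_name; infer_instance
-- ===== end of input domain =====

-- B replaces A's char-by-char accumulation loop with an index-then-slice
-- decomposition (find the first delimiter position in the first 24 chars,
-- then slice); objective: alternative decomposition, not faster (both touch ≤ 24 chars).

-- ===== PORT A =====
-- A's for-loop over range(len(str)) with accumulator ret and two breaks,
-- as structural recursion over the remaining characters.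
def sliceA : List Char → List Char → List Char
  | [], ret => ret
  | c :: cs, ret =>
    if 23 ≤ ret.length then ret ++ "...".toList
    else if c = ':' ∨ c = '(' then ret
    else sliceA cs (ret ++ [c])

def slice_name (str : String) : String :=
  String.mk (sliceA str.toList [])

-- ===== PORT B =====
-- next((i for i, ch in enumerate(head) if ch in ':('), len(head)):
-- index of the first ':' or '(' in the list, or its length if absent.
def firstDelim : List Char → Nat
  | [] => 0
  | c :: cs => if c = ':' ∨ c = '(' then 0 else firstDelim cs + 1

def slice_name_alt (str : String) : String :=
  let cs := str.toList
  let head := cs.take 24            -- str[:24]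
  let d := firstDelim head
  if 23 ≤ d ∧ 24 ≤ cs.length then String.mk (cs.take 23 ++ "...".toList)  -- str[:23] + "..."
  else String.mk (cs.take d)        -- str[:d], 0 ≤ d

-- ===== PRECONDITION & SPEC =====
def Spec_slice_name (str : String) (out : String) : Prop := out = slice_name_alt str
instance (str : String) (out : String) : Decidable (Spec_slice_name str out) := by unfold Spec_slice_name; infer_instance

-- ===== CLAIM (what is proved, stated in full; the proofs are below) =====
def Claim_equal_slice_name : Prop := ∀ (str : String), Dom_slice_name str → Spec_slice_name str (slice_name str)

-- ===== LEMMAS AND PROOFS =====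

theorem firstDelim_le_length (cs : List Char) : firstDelim cs ≤ cs.length := by
  induction cs with
  | nil => simp [firstDelim]
  | cons c cs ih =>
    by_cases hd : c = ':' ∨ c = '(' <;> simp [firstDelim, hd] <;> omega

theorem firstDelim_take (n : ℕ) (cs : List Char) :
    firstDelim (cs.take n) = min (firstDelim cs) n := by
  induction cs generalizing n with
  | nil => simp [firstDelim]
  | cons c cs ih =>
    cases n with
    | zero => simp [firstDelim]
    | succ n =>
      by_cases hd : c = ':' ∨ c = '('
      · simp [firstDelim, hd]
      · simp [firstDelim, hd, ih n]

theorem sliceA_eq (cs : List Char) : ∀ (acc : List Char), acc.length ≤ 23 →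
    sliceA cs acc =
      if 23 - acc.length ≤ firstDelim cs ∧ 24 - acc.length ≤ cs.length
      then acc ++ cs.take (23 - acc.length) ++ "...".toList
      else acc ++ cs.take (firstDelim cs) := by
  induction cs with
  | nil =>
    intro acc h
    simp only [firstDelim, List.take_nil, List.append_nil, List.length_nil, sliceA]
    rw [if_neg (by omega)]
  | cons c cs ih =>
    intro acc h
    by_cases h23 : 23 ≤ acc.length
    · have hL : acc.length = 23 := le_antisymm h h23
      rw [if_pos (by constructor <;> simp <;> omega)]
      simp [sliceA, h23, hL]
    · by_cases hd : c = ':' ∨ c = '('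
      · rw [if_neg (by simp [firstDelim, hd]; omega)]
        simp [sliceA, h23, hd, firstDelim]
      · have hL : acc.length < 23 := by omega
        have step : sliceA (c :: cs) acc = sliceA cs (acc ++ [c]) := by
          simp [sliceA, h23, hd]
        rw [step, ih (acc ++ [c]) (by simp; omega)]
        simp only [List.length_append, List.length_nil, Nat.zero_add, firstDelim, hd,
          if_false, List.length_cons]
        have e1 : 23 - (acc.length + 1) = 22 - acc.length := by omega
        have e2 : 24 - (acc.length + 1) = 23 - acc.length := by omega
        have e3 : (c :: cs).take (23 - acc.length) = c :: cs.take (22 - acc.length) := by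
          rw [show 23 - acc.length = (22 - acc.length) + 1 from by omega, List.take_succ_cons]
        have e4 : (c :: cs).take (firstDelim cs + 1) = c :: cs.take (firstDelim cs) :=
          List.take_succ_cons ..
        rw [e1, e2, e3, e4]
        split_ifs with h1 h2 h2 <;> simp_all <;> omega

-- ===== VERDICT (by name: the statement is the Claim_ definition above) =====
theorem slice_name_spec : Claim_equal_slice_name := by
  intro str _
  unfold Spec_slice_name slice_name slice_name_alt
  rw [sliceA_eq str.toList [] (by simp)]
  simp only [List.length_nil, Nat.sub_zero, firstDelim_take, List.append_nil, List.nil_append]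
  have hle := firstDelim_le_length str.toList
  by_cases hc : 23 ≤ firstDelim str.toList ∧ 24 ≤ str.toList.length
  · rw [if_pos hc, if_pos (⟨by omega, hc.2⟩ : 23 ≤ min (firstDelim str.toList) 24 ∧ 24 ≤ str.toList.length)]
  · rw [if_neg hc, if_neg (by omega : ¬(23 ≤ min (firstDelim str.toList) 24 ∧ 24 ≤ str.toList.length))]
    rw [show min (firstDelim str.toList) 24 = firstDelim str.toList from by omega]
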